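-- pv_equiv track=rewrite | github.com/timcour/aoc | 2022/08/go.py | find_visible_in_line
-- ===== SOURCE A (Python) =====
-- def find_visible_in_line(grid, hor, ver):
--     vis = set()
--     count = 0
--     last = -1
--     for i in range(*ver):
--         for j in range(*hor):
--             if grid[i][j] > last:
--                 vis.add((i, j))
--             last = max([last, grid[i][j]])
--             count +=1
--     return vis
-- ===== SOURCE B (Python) =====
-- def find_visible_in_line(grid, hor, ver):
--     cells = [((i, j), grid[i][j]) for i in range(*ver) for j in range(*hor)]
--     prefmax = []
--     best = -1
--     for _, v in cells:
--         prefmax.append(best)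
--         if v > best:
--             best = v
--     return {c for (c, v), pm in zip(cells, prefmax) if v > pm}
-- ===== Notes on version B (the rewrite author's own statement) =====
-- stated objective: alternative
-- what changed: replaces the single nested running-maximum scan by flattening the cells into one list, building a prefix-max table seeded with -1, and then filtering the cells against that table in a separate zip pass
import Mathlib
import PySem

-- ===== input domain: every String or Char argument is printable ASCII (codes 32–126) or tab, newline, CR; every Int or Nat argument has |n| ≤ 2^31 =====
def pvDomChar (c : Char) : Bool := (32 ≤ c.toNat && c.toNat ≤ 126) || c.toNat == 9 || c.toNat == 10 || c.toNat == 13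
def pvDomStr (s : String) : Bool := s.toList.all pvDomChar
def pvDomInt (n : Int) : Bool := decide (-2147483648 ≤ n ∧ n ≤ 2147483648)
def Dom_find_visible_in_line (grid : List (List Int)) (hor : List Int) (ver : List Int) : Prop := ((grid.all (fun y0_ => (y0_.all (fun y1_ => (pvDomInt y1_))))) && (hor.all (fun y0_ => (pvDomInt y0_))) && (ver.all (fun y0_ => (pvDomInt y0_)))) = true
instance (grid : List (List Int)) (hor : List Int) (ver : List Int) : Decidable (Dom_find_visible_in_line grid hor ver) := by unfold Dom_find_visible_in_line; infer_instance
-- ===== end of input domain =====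

-- B replaces A's nested running-maximum scan by a flatten / prefix-max table / zip-filter decomposition; same cost (objective: alternative).


-- shared helper: the arguments range(*v) receives (none = TypeError/ValueError: wrong arity or zero step)
def pvRangeArgs? (v : List Int) : Option (Int × Int × Int) :=
  match v with
  | [b] => some (0, b, 1)
  | [a, b] => some (a, b, 1)
  | [a, b, s] => if s = 0 then none else some (a, b, s)
  | _ => none

-- shared helper: list(range(*v)) (junk [] on invalid v; Pre_ excludes that)
def pvRangeOf (v : List Int) : List Int :=
  match pvRangeArgs? v with
  | some (a, b, s) => PySem.List.pyRange a b s
  | none => []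

-- ===== PORT A =====
def find_visible_in_line (grid : List (List Int)) (hor : List Int) (ver : List Int) : List (Int × Int) :=
  -- state (vis, count, last), exactly A's loop variables (count is dead, kept)
  let st := (pvRangeOf ver).foldl (fun (st : PySem.Set (Int × Int) × Int × Int) i =>
      (pvRangeOf hor).foldl (fun (st : PySem.Set (Int × Int) × Int × Int) j =>
        let g := PySem.List.pyGetD (PySem.List.pyGetD grid i []) j 0
        let vis := if g > st.2.2 then PySem.Set.add st.1 (i, j) else st.1
        (vis, st.2.1 + 1, max st.2.2 g)) st)
    (PySem.Set.empty, 0, -1)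
  st.1

-- ===== PORT B =====
def find_visible_in_line_alt (grid : List (List Int)) (hor : List Int) (ver : List Int) : List (Int × Int) :=
  let cells : List ((Int × Int) × Int) :=
    (pvRangeOf ver).flatMap (fun i => (pvRangeOf hor).map (fun j =>
      ((i, j), PySem.List.pyGetD (PySem.List.pyGetD grid i []) j 0)))
  let pm := cells.foldl (fun (st : List Int × Int) cv =>
      (st.1 ++ [st.2], if cv.2 > st.2 then cv.2 else st.2)) ([], -1)
  PySem.Set.ofList (((cells.zip pm.1).filter (fun p => decide (p.1.2 > p.2))).map (fun p => p.1.1))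

-- ===== PRECONDITION & SPEC =====
-- Pre_ = exactly where the Python A returns: ver is a valid range spec, hor is one too when the
-- outer loop runs at least once, and every visited grid[i][j] access is in range (negative wrap allowed).
def Pre_find_visible_in_line (grid : List (List Int)) (hor : List Int) (ver : List Int) : Prop :=
  (pvRangeArgs? ver).isSome = true ∧
  (pvRangeOf ver ≠ [] → (pvRangeArgs? hor).isSome = true) ∧
  ∀ i ∈ pvRangeOf ver, ∀ j ∈ pvRangeOf hor,
    PySem.Raise.InRange grid.length i ∧ PySem.Raise.InRange (PySem.List.pyGetD grid i []).length j
instance (grid : List (List Int)) (hor : List Int) (ver : List Int) : Decidable (Pre_find_visible_in_line grid hor ver) := by unfold Pre_find_visible_in_line; infer_instance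
def pvWitness_find_visible_in_line : List (List Int) × List Int × List Int :=
  ([[3, 0, 3], [2, 5, 1], [6, 5, 2]], [0, 3], [0, 3])
def Spec_find_visible_in_line (grid : List (List Int)) (hor : List Int) (ver : List Int) (out : List (Int × Int)) : Prop := out = find_visible_in_line_alt grid hor ver
instance (grid : List (List Int)) (hor : List Int) (ver : List Int) (out : List (Int × Int)) : Decidable (Spec_find_visible_in_line grid hor ver out) := by unfold Spec_find_visible_in_line; infer_instance

-- ===== CLAIM (what is proved, stated in full; the proofs are below) =====
def Claim_equal_find_visible_in_line : Prop := ∀ (grid : List (List Int)) (hor : List Int) (ver : List Int), Dom_find_visible_in_line grid hor ver → Pre_find_visible_in_line grid hor ver → Spec_find_visible_in_line grid hor ver (find_visible_in_line grid hor ver)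

-- ===== LEMMAS AND PROOFS =====

-- coordinates A adds, in order, starting from running maximum `last`
def pvSel (last : Int) : List ((Int × Int) × Int) → List (Int × Int)
  | [] => []
  | (c, v) :: rest => (if v > last then [c] else []) ++ pvSel (max last v) rest

-- the prefix-max table B builds, starting from `best`
def pvPm (best : Int) : List ((Int × Int) × Int) → List Int
  | [] => []
  | (_, v) :: rest => best :: pvPm (max best v) rest

lemma pvA_fold (cells : List ((Int × Int) × Int)) :
    ∀ (vis : PySem.Set (Int × Int)) (cnt last : Int),
      (cells.foldl (fun (st : PySem.Set (Int × Int) × Int × Int) cv =>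
        let vis := if cv.2 > st.2.2 then PySem.Set.add st.1 cv.1 else st.1
        (vis, st.2.1 + 1, max st.2.2 cv.2)) (vis, cnt, last)).1
      = (pvSel last cells).foldl PySem.Set.add vis := by
  induction cells with
  | nil => intro vis cnt last; simp [pvSel]
  | cons cv rest ih =>
    intro vis cnt last
    obtain ⟨c, v⟩ := cv
    simp only [List.foldl_cons, pvSel, List.foldl_append]
    by_cases h : v > last <;> simp [h, ih]

lemma pvB_fold (cells : List ((Int × Int) × Int)) :
    ∀ (acc : List Int) (best : Int),
      (cells.foldl (fun (st : List Int × Int) cv =>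
        (st.1 ++ [st.2], if cv.2 > st.2 then cv.2 else st.2)) (acc, best)).1
      = acc ++ pvPm best cells := by
  induction cells with
  | nil => intro acc best; simp [pvPm]
  | cons cv rest ih =>
    intro acc best
    obtain ⟨c, v⟩ := cv
    have hm : (if v > best then v else best) = max best v := by
      by_cases h : v > best <;> simp [h] <;> omega
    simp [pvPm, ih, hm]

lemma pvZip_filter (cells : List ((Int × Int) × Int)) :
    ∀ best : Int,
      ((cells.zip (pvPm best cells)).filter (fun p => decide (p.1.2 > p.2))).map (fun p => p.1.1)
      = pvSel best cells := by
  induction cells with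
  | nil => intro best; simp [pvPm, pvSel]
  | cons cv rest ih =>
    intro best
    obtain ⟨c, v⟩ := cv
    by_cases h : v > best <;> simp [pvPm, pvSel, h, ih]

-- A's nested loop, flattened over B's cell list
lemma pvA_flat (grid : List (List Int)) (hor ver : List Int) :
    find_visible_in_line grid hor ver
    = (((pvRangeOf ver).flatMap (fun i => (pvRangeOf hor).map (fun j =>
        ((i, j), PySem.List.pyGetD (PySem.List.pyGetD grid i []) j 0)))).foldl
        (fun (st : PySem.Set (Int × Int) × Int × Int) cv =>
          let vis := if cv.2 > st.2.2 then PySem.Set.add st.1 cv.1 else st.1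
          (vis, st.2.1 + 1, max st.2.2 cv.2)) (PySem.Set.empty, 0, -1)).1 := by
  unfold find_visible_in_line
  rw [List.foldl_flatMap]
  simp only [List.foldl_map]

-- ===== VERDICT (by name: the statement is the Claim_ definition above) =====
theorem find_visible_in_line_spec : Claim_equal_find_visible_in_line := by
  intro grid hor ver _ _
  unfold Spec_find_visible_in_line find_visible_in_line_alt
  dsimp only
  rw [pvA_flat, pvA_fold, pvB_fold, List.nil_append, pvZip_filter]
  simp [PySem.Set.ofList_eq_foldl, PySem.Set.empty]
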